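-- pv_equiv track=rewrite | github.com/user-vinaykumar/pythonProject | Problems/apple_problem.py | occur
-- ===== SOURCE A (Python) =====
-- def occur(item):
--     dictionary = {}
--     sets = set()
--
--     for i in item:
--         dictionary[i] = dictionary.get(i, 0) + 1
--     for value in dictionary.values():
--         sets.add(value)
--     if len(dictionary.values()) == len(sets):
--         return True
--     else:
--         return False
-- ===== SOURCE B (Python) =====
-- def occur(item):
--     counts = {}
--     for i in item:
--         counts[i] = counts.get(i, 0) + 1
--     vals = sorted(counts.values())
--     for a, b in zip(vals, vals[1:]):
--         if a == b:
--             return False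
--     return True
-- ===== Notes on version B (the rewrite author's own statement) =====
-- stated objective: alternative
-- what changed: The counts are still tallied in a dict, but the distinctness test is replaced: instead of pouring the counts into a set and comparing cardinalities, B sorts the counts and scans one pass over adjacent pairs, returning False on the first equal neighbours.
import Mathlib
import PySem

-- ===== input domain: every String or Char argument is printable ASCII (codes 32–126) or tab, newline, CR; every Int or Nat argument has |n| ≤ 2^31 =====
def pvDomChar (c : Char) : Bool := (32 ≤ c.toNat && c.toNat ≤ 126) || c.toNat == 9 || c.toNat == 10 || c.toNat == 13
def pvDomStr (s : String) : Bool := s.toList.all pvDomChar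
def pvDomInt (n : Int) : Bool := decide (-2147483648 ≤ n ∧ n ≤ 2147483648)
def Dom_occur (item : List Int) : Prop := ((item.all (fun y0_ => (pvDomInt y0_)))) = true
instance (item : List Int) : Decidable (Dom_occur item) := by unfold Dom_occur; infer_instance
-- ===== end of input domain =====

-- B replaces A's set-cardinality distinctness test by sort-then-adjacent-scan over the counts (alternative decomposition, same results).

-- ===== PORT A =====
def occur (item : List Int) : Bool :=
  let dictionary : PySem.Dict Int Int :=
    item.foldl (fun d i => d.insert i (d.getD i 0 + 1)) PySem.Dict.empty
  let sets : PySem.Set Int :=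
    dictionary.values.foldl PySem.Set.add PySem.Set.empty
  if dictionary.values.length == PySem.Set.len sets then true else false

-- ===== PORT B =====
-- the zip(vals, vals[1:]) loop of Source B: return False on the first equal adjacent pair
def adjScan : List Int → Bool
  | a :: b :: t => if a == b then false else adjScan (b :: t)
  | _ => true

def occur_alt (item : List Int) : Bool :=
  let counts : PySem.Dict Int Int :=
    item.foldl (fun d i => d.insert i (d.getD i 0 + 1)) PySem.Dict.empty
  adjScan (PySem.List.sorted counts.values (fun x => x) false)

-- ===== PRECONDITION & SPEC =====
def Spec_occur (item : List Int) (out : Bool) : Prop := out = occur_alt item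
instance (item : List Int) (out : Bool) : Decidable (Spec_occur item out) := by unfold Spec_occur; infer_instance

-- ===== CLAIM (what is proved, stated in full; the proofs are below) =====
def Claim_equal_occur : Prop := ∀ (item : List Int), Dom_occur item → Spec_occur item (occur item)

-- ===== LEMMAS AND PROOFS =====

-- foldl Set.add appends a sublist of the scanned elements after the accumulator
theorem foldl_add_sublist {α : Type} [BEq α] (xs : List α) (s : List α) :
    ∃ t, List.foldl PySem.Set.add s xs = s ++ t ∧ t.Sublist xs := by
  induction xs generalizing s with
  | nil => exact ⟨[], by simp⟩
  | cons x xs ih =>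
    by_cases hc : List.contains s x
    · have hadd : PySem.Set.add s x = s := by
        simp [PySem.Set.add, PySem.Set.contains_eq_listContains, hc]
      obtain ⟨t, ht, hs⟩ := ih s
      exact ⟨t, by simpa [List.foldl, hadd] using ht, hs.cons x⟩
    · have hadd : PySem.Set.add s x = s ++ [x] := by
        simp [PySem.Set.add, PySem.Set.contains_eq_listContains, hc]
      obtain ⟨t, ht, hs⟩ := ih (s ++ [x])
      exact ⟨x :: t, by simp [List.foldl, hadd, ht], hs.cons₂ x⟩

theorem ofList_sublist {α : Type} [BEq α] (xs : List α) :
    (PySem.Set.ofList xs).Sublist xs := by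
  obtain ⟨t, ht, hs⟩ := foldl_add_sublist xs ([] : List α)
  simpa [PySem.Set.ofList, PySem.Set.empty, ht] using hs

-- A's test: len(set(vs)) == len(vs) iff vs has no duplicates
theorem ofList_length_iff (vs : List Int) :
    ((PySem.Set.ofList vs).length = vs.length ↔ vs.Nodup) := by
  constructor
  · intro h
    have := (ofList_sublist vs).eq_of_length h
    simpa [this] using PySem.Set.nodup_ofList (xs := vs)
  · intro h
    rw [PySem.Set.ofList_eq_self_of_nodup vs h]

-- B's test: on a ≤-sorted list, no equal adjacent pair iff no duplicates at all
theorem adjScan_eq_nodup (l : List Int) (h : l.Pairwise (· ≤ ·)) :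
    adjScan l = decide l.Nodup := by
  induction l with
  | nil => simp [adjScan]
  | cons a t ih =>
    cases t with
    | nil => simp [adjScan]
    | cons b t =>
      rw [List.pairwise_cons] at h
      obtain ⟨hle, hp⟩ := h
      by_cases hab : a = b
      · subst hab
        simp [adjScan, List.nodup_cons]
      · have hlt : a < b := lt_of_le_of_ne (hle b (by simp)) hab
        have hnm : a ∉ b :: t := by
          intro hm
          rw [List.mem_cons] at hm
          rcases hm with rfl | hm
          · exact hab rfl
          · have : b ≤ a := (List.pairwise_cons.mp hp).1 a hm
            exact absurd hlt (not_lt.mpr this)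
        have : adjScan (a :: b :: t) = adjScan (b :: t) := by
          simp [adjScan, hab]
        rw [this, ih hp]
        simp [List.nodup_cons, hnm]

theorem key_eq (vs : List Int) :
    (if ((vs.length : Int) == PySem.Set.len (List.foldl PySem.Set.add PySem.Set.empty vs)) = true
       then true else false)
      = adjScan (PySem.List.sorted vs (fun x => x) false) := by
  have hpair : (PySem.List.sorted vs (fun x => x) false).Pairwise (· ≤ ·) := by
    simpa using PySem.List.sorted_pairwise vs (fun x => x)
  rw [adjScan_eq_nodup _ hpair]
  rw [show decide (PySem.List.sorted vs (fun x => x) false).Nodup = decide vs.Nodup from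
        decide_eq_decide.mpr (PySem.List.sorted_perm vs (fun x => x) false).nodup_iff]
  have hA : (List.foldl PySem.Set.add PySem.Set.empty vs) = PySem.Set.ofList vs := rfl
  rw [hA]
  by_cases hn : vs.Nodup
  · have := (ofList_length_iff vs).mpr hn
    simp [PySem.Set.len, this, hn]
  · have hne : (PySem.Set.ofList vs).length ≠ vs.length := fun h => hn ((ofList_length_iff vs).mp h)
    simp only [PySem.Set.len, beq_iff_eq, hn, decide_false]
    have : ((vs.length : Int) ≠ ((PySem.Set.ofList vs).length : Int)) := by
      intro h
      exact hne (by exact_mod_cast h.symm)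
    simp [this]

-- ===== VERDICT (by name: the statement is the Claim_ definition above) =====
theorem occur_spec : Claim_equal_occur := by
  intro item _
  exact key_eq ((item.foldl (fun d i => d.insert i (d.getD i 0 + 1)) PySem.Dict.empty).values)
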